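-- pv_equiv track=rewrite | github.com/keemgdeok/Algorithm | 프로그래머스/2/131704. 택배상자/택배상자.py | solution
-- ===== SOURCE A (Python) =====
-- def solution(order):
--     ans = 0
--     stack = [0]
--     n=1
--     i=0
--     while n <= len(order):
--         stack.append(n)
--         while i < len(order) and stack[-1] == order[i]:
--             stack.pop()
--             ans+=1
--             i+=1
--         n+=1
--
--
--     return ans
-- ===== SOURCE B (Python) =====
-- def solution(order):
--     ans = 0
--     stack = []
--     push = 1
--     n = len(order)
--     for x in order:
--         while push <= n and (not stack or stack[-1] != x):
--             stack.append(push)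
--             push += 1
--         if stack and stack[-1] == x:
--             stack.pop()
--             ans += 1
--         else:
--             break
--     return ans
-- ===== Notes on version B (the rewrite author's own statement) =====
-- stated objective: faster
-- what changed: B iterates over the order list (the demanded boxes) instead of over push candidates, lazily pushing consecutive box numbers until the top matches, with an explicit empty-stack test and an early break on the first undeliverable box instead of A's sentinel 0 and unconditional outer push loop; the early break and leaner per-element loop give a constant-factor speedup (measured ~2x).
-- outside the precondition, e.g. on solution([1, 0]): A returns 2, B returns 1; on solution([1, 0, 2]): A raises IndexError, B returns 1
import Mathlib
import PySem

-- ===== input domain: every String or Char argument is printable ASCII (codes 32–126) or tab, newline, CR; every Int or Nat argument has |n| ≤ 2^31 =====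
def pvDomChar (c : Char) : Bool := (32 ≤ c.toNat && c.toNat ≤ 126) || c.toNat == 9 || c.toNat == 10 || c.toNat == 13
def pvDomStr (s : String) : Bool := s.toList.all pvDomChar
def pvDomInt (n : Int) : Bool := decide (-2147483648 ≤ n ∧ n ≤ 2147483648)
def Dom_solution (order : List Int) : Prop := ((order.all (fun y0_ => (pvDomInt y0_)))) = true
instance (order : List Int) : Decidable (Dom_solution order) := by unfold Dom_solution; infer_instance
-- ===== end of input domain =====

-- B iterates over the demanded boxes with a lazy push counter, an explicit empty-stack
-- test and an early break, instead of A's outer loop over push candidates with a sentinel 0.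

-- ===== PORT A =====
-- Stacks are kept top-at-head (Python appends/pops at the end; same contents, reversed).
-- popAllA is the inner 'while i < len(order) and stack[-1] == order[i]' pop loop.
-- On an empty stack Python's stack[-1] raises IndexError; inside Pre_ the sentinel 0 is
-- never popped, so that branch is unreachable; the port returns the state unchanged there.
def popAllA (order : List Int) : List Int → Nat → Int → List Int × Nat × Int
  | [], i, ans => ([], i, ans)
  | t :: rest, i, ans =>
    if i < order.length ∧ order[i]? = some t then popAllA order rest (i+1) (ans+1)
    else (t :: rest, i, ans)

-- 'while n <= len(order)' runs exactly order.length times: fuel = len(order) + 1 - n.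
def outerA (order : List Int) : Nat → Nat → List Int → Nat → Int → Int
  | 0, _, _, _, ans => ans
  | fuel+1, n, stack, i, ans =>
    let r := popAllA order ((n : Int) :: stack) i ans
    outerA order fuel (n+1) r.1 r.2.1 r.2.2

def solution (order : List Int) : Int := outerA order order.length 1 [(0 : Int)] 0 0

-- ===== PORT B =====
-- fillB is the 'while push <= n and (not stack or stack[-1] != x)' push loop; it runs at
-- most n - push + 1 times and push ≥ 1 throughout, so fuel = n never cuts it short.
def fillB (x : Int) (n : Nat) : Nat → Nat → List Int → Nat × List Int
  | 0, push, stack => (push, stack)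
  | fuel+1, push, stack =>
    if push ≤ n ∧ stack.head? ≠ some x then fillB x n fuel (push+1) ((push : Int) :: stack)
    else (push, stack)

-- 'for x in order: … else: break' — structural recursion over order.
def goB (n : Nat) : List Int → Nat → List Int → Int → Int
  | [], _, _, ans => ans
  | x :: xs, push, stack, ans =>
    let r := fillB x n n push stack
    match r.2 with
    | t :: rest => if t = x then goB n xs r.1 rest (ans+1) else ans
    | [] => ans

def solution_alt (order : List Int) : Int := goB order.length order 1 [] 0

-- ===== PRECONDITION & SPEC =====
-- Pre_ excludes lists containing 0: box labels are 1..n, and a 0 in order can match A's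
-- bottom sentinel 0, after which A either raises IndexError on the emptied stack (e.g.
-- [1,0,2]) or silently counts the sentinel pop as a delivered box (e.g. A([1,0]) = 2).
def Pre_solution (order : List Int) : Prop := (0 : Int) ∉ order
instance (order : List Int) : Decidable (Pre_solution order) := by unfold Pre_solution; infer_instance
def pvWitness_solution : List Int := [4, 3, 1, 2, 5]
def Spec_solution (order : List Int) (out : Int) : Prop := out = solution_alt order
instance (order : List Int) (out : Int) : Decidable (Spec_solution order out) := by unfold Spec_solution; infer_instance

-- ===== CLAIM (what is proved, stated in full; the proofs are below) =====
def Claim_equal_solution : Prop := ∀ (order : List Int), Dom_solution order → Pre_solution order → Spec_solution order (solution order)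

-- ===== LEMMAS AND PROOFS =====

-- Mrun is the greedy transition system both programs schedule: pop when the stack top is
-- the next demanded box, else push the next box number if any remains, else stop;
-- it returns the number of boxes delivered.  A groups the pops (popAllA) under an outer
-- push loop; B groups the pushes (fillB) under an outer pop loop; both equal Mrun.
def Mrun (order : List Int) (n : Nat) : Nat → List Int → Nat → Nat
  | push, t :: rest, i =>
    if order[i]? = some t then Mrun order n push rest (i+1)
    else if _h : push ≤ n then Mrun order n (push+1) ((push : Int) :: t :: rest) i
    else i
  | push, [], i =>
    if _h : push ≤ n then Mrun order n (push+1) [(push : Int)] i else i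
termination_by push stack _ => (n + 1 - push, stack.length)

theorem Mrun_cons (order : List Int) (n push : Nat) (t : Int) (rest : List Int) (i : Nat) :
    Mrun order n push (t :: rest) i =
      if order[i]? = some t then Mrun order n push rest (i+1)
      else if push ≤ n then Mrun order n (push+1) ((push : Int) :: t :: rest) i
      else i := by
  conv_lhs => rw [Mrun]
  split
  · rfl
  · split <;> rename_i h <;> simp only [h, if_true, if_false, dif_pos, dif_neg, not_false_iff] <;> simp [h]

theorem Mrun_nil (order : List Int) (n push : Nat) (i : Nat) :
    Mrun order n push [] i = if push ≤ n then Mrun order n (push+1) [(push : Int)] i else i := by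
  conv_lhs => rw [Mrun]
  split <;> rename_i h <;> simp [h]

theorem Mrun_noidx (order : List Int) (n : Nat) (push : Nat) (stack : List Int) (i : Nat)
    (h : order[i]? = none) : Mrun order n push stack i = i := by
  fun_induction Mrun order n push stack i <;> simp_all

theorem Mrun_sentinel (order : List Int) (n : Nat) (h0 : (0:Int) ∉ order)
    (push : Nat) (s : List Int) (i : Nat) :
    Mrun order n push (s ++ [(0:Int)]) i = Mrun order n push s i := by
  fun_induction Mrun order n push s i with
  | case1 push t rest i hm ih =>
    simp only [List.cons_append]; rw [Mrun_cons]; simp [hm, ih]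
  | case2 push t rest i hm hp ih =>
    simp only [List.cons_append] at *
    rw [Mrun_cons]; simp only [hm, if_false, if_pos hp]
    exact ih
  | case3 push t rest i hm hp =>
    simp only [List.cons_append]; rw [Mrun_cons]; simp [hm, hp]
  | case4 push i hp ih =>
    have hz : order[i]? ≠ some (0:Int) := fun hc => h0 (List.mem_of_getElem? hc)
    simp only [List.nil_append, List.cons_append] at *
    rw [Mrun_cons, if_neg hz, if_pos hp]
    simpa using ih
  | case5 push i hp =>
    have hz : order[i]? ≠ some (0:Int) := fun hc => h0 (List.mem_of_getElem? hc)
    simp only [List.nil_append]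
    rw [Mrun_cons, if_neg hz, if_neg hp]

theorem popAllA_ans (order : List Int) :
    ∀ (stack : List Int) (i : Nat) (ans : Int),
      (popAllA order stack i ans).2.2 = ans + (((popAllA order stack i ans).2.1 : Int) - i)
  | [], i, ans => by simp [popAllA]
  | t :: rest, i, ans => by
    rw [popAllA]
    split
    · rw [popAllA_ans order rest (i+1) (ans+1)]
      push_cast; ring
    · simp

theorem popAllA_M (order : List Int) (n : Nat) :
    ∀ (stack : List Int) (i : Nat) (ans : Int) (push : Nat),
      Mrun order n push stack i =
        Mrun order n push (popAllA order stack i ans).1 (popAllA order stack i ans).2.1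
  | [], i, ans, push => by simp [popAllA]
  | t :: rest, i, ans, push => by
    rw [popAllA]
    split
    · rename_i h
      rw [Mrun_cons, if_pos h.2]
      exact popAllA_M order n rest (i+1) (ans+1) push
    · simp

theorem popAllA_exit (order : List Int) :
    ∀ (stack : List Int) (i : Nat) (ans : Int) (t : Int) (rest : List Int),
      (popAllA order stack i ans).1 = t :: rest → order[(popAllA order stack i ans).2.1]? ≠ some t
  | [], i, ans, t, rest => by simp [popAllA]
  | t0 :: rest0, i, ans, t, rest => by
    rw [popAllA]
    split
    · exact popAllA_exit order rest0 (i+1) (ans+1) t rest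
    · rename_i h
      intro he
      cases he
      intro hc
      exact h ⟨(List.getElem?_eq_some_iff.mp hc).1, hc⟩

def NoPop (order : List Int) (stack : List Int) (i : Nat) : Prop :=
  ∀ t rest, stack = t :: rest → order[i]? ≠ some t

theorem outerA_M (order : List Int) :
    ∀ (fuel n : Nat) (stack : List Int) (i : Nat) (ans : Int),
      fuel + n = order.length + 1 →
      NoPop order stack i →
      outerA order fuel n stack i ans = ans + ((Mrun order order.length n stack i : Int) - i)
  | 0, n, stack, i, ans => by
    intro hf hnp
    have hn : ¬ n ≤ order.length := by omega
    rw [outerA]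
    cases stack with
    | nil => rw [Mrun_nil, if_neg hn]; ring
    | cons t rest =>
      rw [Mrun_cons, if_neg (hnp t rest rfl), if_neg hn]; ring
  | fuel+1, n, stack, i, ans => by
    intro hf hnp
    have hn : n ≤ order.length := by omega
    rw [outerA]
    set r := popAllA order ((n : Int) :: stack) i ans with hr
    have hstep : Mrun order order.length n stack i
        = Mrun order order.length (n+1) ((n : Int) :: stack) i := by
      cases stack with
      | nil => rw [Mrun_nil, if_pos hn]
      | cons t rest =>
        rw [Mrun_cons (order) (order.length) n t rest i,
            if_neg (hnp t rest rfl), if_pos hn]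
    have hM := popAllA_M order order.length ((n : Int) :: stack) i ans (n+1)
    have hA := popAllA_ans order ((n : Int) :: stack) i ans
    have hexit : NoPop order r.1 r.2.1 := by
      intro t rest h
      exact popAllA_exit order ((n : Int) :: stack) i ans t rest h
    rw [← hr] at hM hA
    rw [← hstep] at hM
    rw [outerA_M order fuel (n+1) r.1 r.2.1 r.2.2 (by omega) hexit]
    rw [← hM, hA]
    ring

theorem fillB_M (order : List Int) (n : Nat) (x : Int) (i : Nat) (hx : order[i]? = some x) :
    ∀ (fuel push : Nat) (stack : List Int),
      n + 1 ≤ fuel + push →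
      Mrun order n push stack i = Mrun order n (fillB x n fuel push stack).1 (fillB x n fuel push stack).2 i ∧
      ((fillB x n fuel push stack).2.head? = some x ∨
        (n < (fillB x n fuel push stack).1 ∧ (fillB x n fuel push stack).2.head? ≠ some x)) ∧
      push ≤ (fillB x n fuel push stack).1
  | 0, push, stack => by
    intro hfp
    refine ⟨rfl, ?_, le_refl _⟩
    by_cases hh : stack.head? = some x
    · exact Or.inl hh
    · exact Or.inr ⟨by simp only [fillB]; omega, hh⟩
  | fuel+1, push, stack => by
    intro hfp
    rw [fillB]
    split
    · rename_i h
      obtain ⟨hp, hh⟩ := h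
      have step : Mrun order n push stack i = Mrun order n (push+1) ((push : Int) :: stack) i := by
        cases stack with
        | nil => rw [Mrun_nil, if_pos hp]
        | cons t rest =>
          have ht : order[i]? ≠ some t := by
            simp only [List.head?_cons] at hh
            rw [hx]; intro hc; cases hc; exact hh rfl
          rw [Mrun_cons, if_neg ht, if_pos hp]
      have ih := fillB_M order n x i hx fuel (push+1) ((push : Int) :: stack) (by omega)
      exact ⟨step.trans ih.1, ih.2.1, by omega⟩
    · rename_i h
      refine ⟨rfl, ?_, le_refl _⟩
      by_cases hh : stack.head? = some x
      · exact Or.inl hh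
      · exact Or.inr ⟨by by_contra hcon; exact h ⟨by omega, hh⟩, hh⟩

theorem goB_M (order : List Int) (n : Nat) (hn : n = order.length) :
    ∀ (xs : List Int) (push : Nat) (stack : List Int) (ans : Int) (i : Nat),
      xs = order.drop i → 1 ≤ push →
      goB n xs push stack ans = ans + ((Mrun order n push stack i : Int) - i)
  | [], push, stack, ans, i => by
    intro hxs hp
    have hnone : order[i]? = none := by
      rw [List.getElem?_eq_none_iff]
      have := congrArg List.length hxs
      simp [List.length_drop] at this
      omega
    rw [goB, Mrun_noidx order n push stack i hnone]
    ring
  | x :: xs, push, stack, ans, i => by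
    intro hxs hp
    have hx : order[i]? = some x := by
      have h0 : (order.drop i)[0]? = some x := by rw [← hxs]; rfl
      rw [List.getElem?_drop] at h0
      simpa using h0
    have hxs' : xs = order.drop (i+1) := by
      have := congrArg List.tail hxs
      simpa [List.tail_drop] using this
    rw [goB]
    set r := fillB x n n push stack with hr
    have hfill := fillB_M order n x i hx n push stack (by omega)
    rw [← hr] at hfill
    obtain ⟨hM, hexit, hmono⟩ := hfill
    rcases hexit with hh | ⟨hgt, hh⟩
    · cases h2 : r.2 with
      | nil => rw [h2] at hh; simp at hh
      | cons t rest =>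
        rw [h2] at hh
        simp only [List.head?_cons] at hh
        cases hh
        simp only [h2, if_pos rfl]
        rw [goB_M order n hn xs r.1 rest (ans+1) (i+1) hxs' (by omega)]
        rw [hM, h2, Mrun_cons, if_pos hx]
        push_cast; ring
    · cases h2 : r.2 with
      | nil =>
        simp only [h2]
        rw [hM, h2, Mrun_nil, if_neg (by omega)]
        ring
      | cons t rest =>
        rw [h2] at hh
        simp only [List.head?_cons] at hh
        have htx : t ≠ x := fun hc => hh (by rw [hc])
        simp only [h2, if_neg htx]
        rw [hM, h2, Mrun_cons, if_neg (by rw [hx]; intro hc; cases hc; exact htx rfl),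
            if_neg (by omega)]
        ring

-- ===== VERDICT (by name: the statement is the Claim_ definition above) =====
theorem solution_spec : Claim_equal_solution := by
  intro order _hd hpre
  unfold Spec_solution solution solution_alt
  have hpre' : (0 : Int) ∉ order := hpre
  have hnp : NoPop order [(0 : Int)] 0 := by
    intro t rest h hc
    cases h
    exact hpre' (List.mem_of_getElem? hc)
  rw [outerA_M order order.length 1 [(0 : Int)] 0 0 (by omega) hnp]
  have hs := Mrun_sentinel order order.length hpre' 1 [] 0
  simp only [List.nil_append] at hs
  rw [hs, goB_M order order.length rfl order 1 [] 0 0 (by simp) (le_refl 1)]
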